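-- pv_equiv track=rewrite | github.com/pypi-data/pypi-mirror-132 | packages/matiq/matiq-0.0.17.tar.gz/matiq-0.0.17/src/matiq.py | sqrt_simplify
-- ===== SOURCE A (Python) =====
-- def sqrt_simplify(n: int):
--     if n < 0:
--         raise ValueError
--     i = 2
--     a = 1
--     while i * i <= n:
--         if n % (i * i) == 0:
--             a *= i
--             n //= i * i
--         else:
--             i = i + 1
--     return a, n
-- ===== SOURCE B (Python) =====
-- def sqrt_simplify(n: int):
--     if n < 0:
--         raise ValueError
--     best = 1
--     k = 1
--     while k * k <= n:
--         if n % (k * k) == 0: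
--             best = k
--         k += 1
--     return best, n // (best * best)
-- ===== Notes on version B (the rewrite author's own statement) =====
-- stated objective: alternative
-- what changed: B scans every k up to sqrt(n) keeping the largest k with k*k dividing n and returns (k, n // (k*k)), instead of A's in-place scheme that repeatedly divides square factors i*i out of n while accumulating a.
import Mathlib
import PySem

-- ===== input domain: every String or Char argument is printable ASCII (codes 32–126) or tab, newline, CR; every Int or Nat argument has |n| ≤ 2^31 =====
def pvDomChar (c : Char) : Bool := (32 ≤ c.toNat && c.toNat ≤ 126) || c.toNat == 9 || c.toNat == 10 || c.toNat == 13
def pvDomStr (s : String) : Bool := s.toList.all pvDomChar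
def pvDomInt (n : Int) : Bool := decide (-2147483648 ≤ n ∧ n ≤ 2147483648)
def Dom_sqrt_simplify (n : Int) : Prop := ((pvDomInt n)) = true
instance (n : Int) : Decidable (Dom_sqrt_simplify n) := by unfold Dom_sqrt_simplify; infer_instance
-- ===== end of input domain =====

-- B scans every k up to sqrt(n) keeping the largest k with k*k ∣ n, instead of A's
-- in-place division of square factors out of n (objective: alternative algorithm).

-- ===== PORT A =====
-- A's while loop, state (i, n, a).  All Python values are provably nonnegative on the
-- admitted inputs (0 ≤ n), so Nat %, / coincide exactly with Python's %, // here.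
-- The extra '2 ≤ i' conjunct in the guard is a termination guard only: the loop is
-- entered with i = 2 and i never decreases, so it is always true at runtime.
def sqsLoopA (i n a : Nat) : Nat × Nat :=
  if h : 2 ≤ i ∧ i * i ≤ n then
    if n % (i * i) = 0 then sqsLoopA i (n / (i * i)) (a * i)
    else sqsLoopA (i + 1) n a
  else (a, n)
termination_by (n, n + 2 - i)
decreasing_by
  · apply Prod.Lex.left
    exact Nat.div_lt_self (by nlinarith [h.1, h.2]) (by nlinarith [h.1])
  · have : i ≤ i * i := Nat.le_mul_of_pos_left i (by omega)
    have : i < n + 2 := by omega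
    exact Prod.Lex.right _ (by omega)

def sqrt_simplify (n : Int) : Int × Int :=
  if n < 0 then (1, n)  -- Python A raises ValueError on negative input; excluded by Pre_
  else
    let p := sqsLoopA 2 n.toNat 1
    ((p.1 : Int), (p.2 : Int))

-- ===== PORT B =====
-- B's while loop, state (k, best); n is never mutated.
def sqsLoopB (k n best : Nat) : Nat :=
  if k * k ≤ n then sqsLoopB (k + 1) n (if n % (k * k) = 0 then k else best)
  else best
termination_by n + 1 - k
decreasing_by
  rcases Nat.eq_zero_or_pos k with h0 | h0
  · omega
  · have : k ≤ k * k := Nat.le_mul_of_pos_left k h0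
    omega

def sqrt_simplify_alt (n : Int) : Int × Int :=
  if n < 0 then (1, n)  -- Python B raises ValueError on negative input; excluded by Pre_
  else
    let m := n.toNat
    let b := sqsLoopB 1 m 1
    ((b : Int), ((m / (b * b) : Nat) : Int))

-- ===== PRECONDITION & SPEC =====
-- Pre_ excludes exactly the negative inputs, on which Python A raises ValueError.
def Pre_sqrt_simplify (n : Int) : Prop := 0 ≤ n
instance (n : Int) : Decidable (Pre_sqrt_simplify n) := by unfold Pre_sqrt_simplify; infer_instance
def pvWitness_sqrt_simplify : Int := 12

def Spec_sqrt_simplify (n : Int) (out : Int × Int) : Prop := out = sqrt_simplify_alt n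
instance (n : Int) (out : Int × Int) : Decidable (Spec_sqrt_simplify n out) := by unfold Spec_sqrt_simplify; infer_instance

-- ===== CLAIM (what is proved, stated in full; the proofs are below) =====
def Claim_equal_sqrt_simplify : Prop := ∀ (n : Int), Dom_sqrt_simplify n → Pre_sqrt_simplify n → Spec_sqrt_simplify n (sqrt_simplify n)

-- ===== LEMMAS AND PROOFS =====

-- Characterisation of A's loop: it returns (a * c, r) with c*c*r = n and r free of
-- square factors, given that every square divisor j ≥ 2 of n is at least i.
theorem sqsLoopA_char :
    ∀ (i n a : Nat), 2 ≤ i → 1 ≤ n →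
      (∀ j, 2 ≤ j → j * j ∣ n → i ≤ j) →
      ∃ c r, sqsLoopA i n a = (a * c, r) ∧ c * c * r = n ∧
        ∀ j, 2 ≤ j → ¬ j * j ∣ r := by
  intro i n a
  induction i, n, a using sqsLoopA.induct with
  | case1 i n a h hm ih =>
    intro hi hn hinv
    have hdvd : i * i ∣ n := Nat.dvd_of_mod_eq_zero hm
    have hpos : 0 < i * i := by nlinarith [h.1]
    obtain ⟨c, r, heq, hcr, hsq⟩ := ih hi
      (by rw [Nat.one_le_div_iff hpos]; exact h.2)
      (fun j hj hjd => hinv j hj (hjd.trans (Nat.div_dvd_of_dvd hdvd)))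
    refine ⟨i * c, r, ?_, ?_, hsq⟩
    · rw [sqsLoopA, dif_pos h, if_pos hm, heq, Nat.mul_assoc]
    · have hmd : i * i * (n / (i * i)) = n := Nat.mul_div_cancel' hdvd
      calc i * c * (i * c) * r = i * i * (c * c * r) := by ring
        _ = n := by rw [hcr]; exact hmd
  | case2 i n a h hm ih =>
    intro hi hn hinv
    have hpos : 0 < i * i := by nlinarith [h.1]
    obtain ⟨c, r, heq, hcr, hsq⟩ := ih (by omega) hn
      (fun j hj hjd => by
        have hij := hinv j hj hjd
        rcases Nat.lt_or_ge i j with h' | h'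
        · omega
        · exfalso
          have hji : j = i := by omega
          subst hji
          exact hm (Nat.mod_eq_zero_of_dvd hjd))
    exact ⟨c, r, by rw [sqsLoopA, dif_pos h, if_neg hm]; exact heq, hcr, hsq⟩
  | case3 i n a h =>
    intro hi hn hinv
    refine ⟨1, n, by rw [sqsLoopA, dif_neg h, Nat.mul_one], by ring, ?_⟩
    intro j hj hjd
    have hij : i ≤ j := hinv j hj hjd
    have hjn : j * j ≤ n := Nat.le_of_dvd (by omega) hjd
    have hii : i * i ≤ j * j := Nat.mul_le_mul hij hij
    exact h ⟨hi, by omega⟩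

-- Characterisation of B's loop: it returns the greatest j with j*j ∣ n.
theorem sqsLoopB_char (n : Nat) :
    ∀ (k best : Nat), 1 ≤ n → best * best ∣ n → best ≤ k →
      (∀ j, j * j ∣ n → j < k → j ≤ best) →
      (sqsLoopB k n best) * (sqsLoopB k n best) ∣ n ∧
        ∀ j, j * j ∣ n → j ≤ sqsLoopB k n best := by
  intro k best
  induction k, best using sqsLoopB.induct n with
  | case1 k best h ih =>
    intro hn hb hbk hmax
    rw [sqsLoopB, if_pos h]
    by_cases hm : n % (k * k) = 0
    · rw [if_pos hm]; rw [dif_pos hm] at ih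
      exact ih hn (Nat.dvd_of_mod_eq_zero hm) (by omega)
        (fun j hj hjk => by
          rcases Nat.lt_or_ge j k with h' | h'
          · exact le_trans (hmax j hj h') hbk
          · omega)
    · rw [if_neg hm]; rw [dif_neg hm] at ih
      exact ih hn hb (by omega)
        (fun j hj hjk => by
          rcases Nat.lt_or_ge j k with h' | h'
          · exact hmax j hj h'
          · have hk : j = k := by omega
            subst hk
            exact absurd (Nat.mod_eq_zero_of_dvd hj) hm)
  | case2 k best h =>
    intro hn hb hbk hmax
    rw [sqsLoopB, if_neg h]
    refine ⟨hb, fun j hj => ?_⟩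
    have hjn : j * j ≤ n := Nat.le_of_dvd (by omega) hj
    have hjk : j < k := by nlinarith [Nat.lt_of_not_le h]
    exact hmax j hj hjk

-- If r has no square factor j*j with j ≥ 2 and k*k ∣ c*c*r then k ≤ c.
theorem sq_dvd_le (c r k : Nat) (hc : 1 ≤ c) (hr : 1 ≤ r)
    (hsq : ∀ j, 2 ≤ j → ¬ j * j ∣ r) (hk : k * k ∣ c * c * r) : k ≤ c := by
  rcases Nat.eq_zero_or_pos k with h0 | h0
  · omega
  have hrsq : Squarefree r := by
    intro x hx
    rcases Nat.eq_zero_or_pos x with hx0 | hx0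
    · subst hx0; simp at hx; omega
    rcases Nat.lt_or_ge x 2 with h2 | h2
    · have : x = 1 := by omega
      subst this; exact isUnit_one
    · exact absurd hx (hsq x h2)
  have hkc : k ∣ c := by
    rw [← Nat.factorization_le_iff_dvd (by omega) (by omega)]
    intro p
    have hkk : k * k ≠ 0 := by positivity
    have hccr : c * c * r ≠ 0 := by positivity
    have hle := (Nat.factorization_le_iff_dvd hkk hccr).mpr hk
    have h1 := hle p
    rw [Nat.factorization_mul (by omega) (by omega)] at h1
    rw [Nat.factorization_mul (by positivity) (by omega),
        Nat.factorization_mul (by omega) (by omega)] at h1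
    have h2 : r.factorization p ≤ 1 := hrsq.natFactorization_le_one p
    simp only [Finsupp.add_apply] at h1
    omega
  exact Nat.le_of_dvd (by omega) hkc

-- ===== VERDICT (by name: the statement is the Claim_ definition above) =====
theorem sqrt_simplify_spec : Claim_equal_sqrt_simplify := by
  intro n _ hpre
  unfold Spec_sqrt_simplify
  have hnn : ¬ n < 0 := by exact not_lt.mpr hpre
  rcases Nat.eq_zero_or_pos n.toNat with h0 | h0
  · have hA : sqsLoopA 2 0 1 = (1, 0) := by rw [sqsLoopA]; norm_num
    have hB : sqsLoopB 1 0 1 = 1 := by rw [sqsLoopB]; norm_num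
    simp [sqrt_simplify, sqrt_simplify_alt, hnn, h0, hA, hB]
  · obtain ⟨c, r, hA, hcr, hsq⟩ :=
      sqsLoopA_char 2 n.toNat 1 (by omega) h0 (fun j hj _ => hj)
    rw [Nat.one_mul] at hA
    obtain ⟨hbd, hbmax⟩ :=
      sqsLoopB_char n.toNat 1 1 h0 (by simp) le_rfl
        (fun j hj hjk => by
          have hj0 : j = 0 := by omega
          subst hj0
          simp at hj
          omega)
    have hc1 : 1 ≤ c := by
      rcases Nat.eq_zero_or_pos c with h' | h'
      · subst h'; simp at hcr; omega
      · omega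
    have hr1 : 1 ≤ r := by
      rcases Nat.eq_zero_or_pos r with h' | h'
      · subst h'; rw [← hcr] at h0; simp at h0
      · omega
    have hBeq : sqsLoopB 1 n.toNat 1 = c :=
      le_antisymm (sq_dvd_le c r _ hc1 hr1 hsq (by rw [hcr]; exact hbd))
        (hbmax c ⟨r, hcr.symm⟩)
    have hdiv : n.toNat / (c * c) = r := by
      rw [← hcr, Nat.mul_div_cancel_left r (by positivity)]
    simp [sqrt_simplify, sqrt_simplify_alt, hnn, hA, hBeq, hdiv]
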